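-- pv_equiv track=rewrite | github.com/fspinna/TS_AgnosticLocalExplainer | shap_utils.py | generate_segment_list
-- ===== SOURCE A (Python) =====
-- def generate_segment_list(segmentation):
--     # from list of ending segment idxs to list of tuple with starting and ending idxs
--     # ex. [5,9,12] --> [(0,5),(5,9),(9,12)]
--     segment_list = []
--     if len(segmentation) == 1:
--         segment_list.append((0,segmentation[0]))
--     for i in range(len(segmentation) - 1):
--         if i == 0:
--             segment_list.append((0, segmentation[i]))
--         segment_list.append((segmentation[i], segmentation[i + 1]))
--     return segment_list
-- ===== SOURCE B (Python) =====
-- def generate_segment_list(segmentation):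
--     # Back-to-front construction: walk the endings in reverse, emitting each
--     # (start, end) pair in reverse order, close with the (0, first) pair,
--     # then flip the accumulated list once at the end.
--     pairs = []
--     end = None
--     for e in reversed(segmentation):
--         if end is not None:
--             pairs.append((e, end))
--         end = e
--     if end is not None:
--         pairs.append((0, end))
--     pairs.reverse()
--     return pairs
-- ===== Notes on version B (the rewrite author's own statement) =====
-- stated objective: alternative
-- what changed: Replaces A's forward index loop with its len==1 special case and i==0 branch by a back-to-front traversal that emits the pairs in reverse order while threading the last-seen ending, closes with the (0, first) pair, and reverses the accumulated list once.
import Mathlib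
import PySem

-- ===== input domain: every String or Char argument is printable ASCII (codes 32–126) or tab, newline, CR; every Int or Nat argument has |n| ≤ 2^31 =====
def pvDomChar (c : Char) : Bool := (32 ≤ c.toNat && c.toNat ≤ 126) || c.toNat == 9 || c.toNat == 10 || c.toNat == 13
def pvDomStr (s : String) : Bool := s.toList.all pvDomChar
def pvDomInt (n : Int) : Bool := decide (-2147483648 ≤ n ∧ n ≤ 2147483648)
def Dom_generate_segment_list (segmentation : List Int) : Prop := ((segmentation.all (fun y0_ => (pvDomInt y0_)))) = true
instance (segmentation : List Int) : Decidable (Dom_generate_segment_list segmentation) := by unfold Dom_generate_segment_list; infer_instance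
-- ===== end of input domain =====

-- B replaces A's forward index loop (length-one special case + i==0 branch) by a back-to-front
-- traversal that emits the pairs in reverse order, closes with (0, first), and flips once (objective: alternative).

-- ===== PORT A =====
def generate_segment_list (segmentation : List Int) : List (Int × Int) :=
  let segment_list : List (Int × Int) := []
  let segment_list :=
    if segmentation.length = 1 then
      segment_list ++ [((0:Int), PySem.List.pyGetD segmentation 0 0)]
    else segment_list
  (PySem.List.pyRange 0 ((segmentation.length : Int) - 1) 1).foldl
    (fun acc i =>
      let acc2 := if i = 0 then acc ++ [((0:Int), PySem.List.pyGetD segmentation i 0)] else acc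
      acc2 ++ [(PySem.List.pyGetD segmentation i 0, PySem.List.pyGetD segmentation (i+1) 0)])
    segment_list

-- ===== PORT B =====
-- the body of B's reversed-traversal loop: append (e, end) when an ending was already seen,
-- and record e as the new last-seen ending
def gslStep (st : List (Int × Int) × Option Int) (e : Int) : List (Int × Int) × Option Int :=
  ((match st.2 with
    | some en => st.1 ++ [(e, en)]
    | none => st.1), some e)

def generate_segment_list_alt (segmentation : List Int) : List (Int × Int) :=
  let st := segmentation.reverse.foldl gslStep ([], none)
  let pairs :=
    match st.2 with
    | some en => st.1 ++ [((0:Int), en)]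
    | none => st.1
  pairs.reverse

-- ===== PRECONDITION & SPEC =====
def Spec_generate_segment_list (segmentation : List Int) (out : List (Int × Int)) : Prop := out = generate_segment_list_alt segmentation
instance (segmentation : List Int) (out : List (Int × Int)) : Decidable (Spec_generate_segment_list segmentation out) := by unfold Spec_generate_segment_list; infer_instance

-- ===== CLAIM (what is proved, stated in full; the proofs are below) =====
def Claim_equal_generate_segment_list : Prop := ∀ (segmentation : List Int), Dom_generate_segment_list segmentation → Spec_generate_segment_list segmentation (generate_segment_list segmentation)

-- ===== LEMMAS AND PROOFS =====

-- B's reversed-traversal loop state: the reversed adjacent pairs and the head (last-seen ending).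
lemma gsl_state_char (l : List Int) :
    l.reverse.foldl gslStep ([], none) = ((l.dropLast.zip l.tail).reverse, l.head?) := by
  rw [List.foldl_reverse]
  induction l with
  | nil => rfl
  | cons a t ih =>
    cases t with
    | nil => rfl
    | cons b u =>
      simp only [List.foldr_cons] at ih ⊢
      rw [ih]
      simp [gslStep, List.dropLast_cons_of_ne_nil]

-- hence B computes the zip of the endings with the 0-seeded shift.
lemma alt_eq_zip (seg : List Int) :
    generate_segment_list_alt seg = ((0 :: seg).dropLast).zip seg := by
  cases seg with
  | nil => rfl
  | cons a t =>
    simp only [generate_segment_list_alt, gsl_state_char]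
    cases t with
    | nil => rfl
    | cons b u =>
      simp [List.dropLast_cons_of_ne_nil]

-- A's inner loop, for indices ≥ j, produces exactly the adjacent pairs that zipping
-- the two shifted suffixes of the list produces.
lemma map_pair_eq_zip (seg : List Int) (j : Int) (hj : 0 ≤ j) :
    (PySem.List.pyRange j ((seg.length:Int) - 1) 1).map
      (fun i => (PySem.List.pyGetD seg i 0, PySem.List.pyGetD seg (i+1) 0))
    = (seg.drop j.toNat).dropLast.zip (seg.drop (j.toNat+1)) := by
  apply List.ext_getElem
  · simp [PySem.List.length_pyRange_one]; omega
  · intro k h1 h2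
    have hk : (k:Int) < (seg.length:Int) - 1 - j := by
      simp [PySem.List.length_pyRange_one] at h1; omega
    simp only [List.getElem_map, PySem.List.getElem_pyRange_one, List.getElem_zip,
      List.getElem_dropLast, List.getElem_drop]
    rw [PySem.List.pyGetD_eq_getElem _ 0 (by omega) (by omega)]
    rw [PySem.List.pyGetD_eq_getElem _ 0 (by omega) (by omega)]
    simp only [Prod.mk.injEq]
    refine ⟨by congr 1; omega, by congr 1; omega⟩

lemma ports_agree (seg : List Int) : generate_segment_list seg = generate_segment_list_alt seg := by
  match seg with
  | [] => rfl
  | [a] =>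
    simp [generate_segment_list, alt_eq_zip, PySem.List.pyRange_one_eq_nil,
      PySem.List.pyGetD_zero_cons]
  | a :: b :: t =>
    rw [alt_eq_zip]
    simp only [generate_segment_list]
    rw [if_neg (by simp)]
    rw [PySem.List.pyRange_one_cons (by simp)]
    simp only [List.foldl_cons, reduceIte, List.nil_append]
    rw [PySem.List.foldl_congr_mem _ _
      (fun acc i => acc ++ [(PySem.List.pyGetD (a::b::t) i 0, PySem.List.pyGetD (a::b::t) (i+1) 0)]) _
      (by
        intro acc i hi
        have h1 : (1:Int) ≤ i := by
          have := (PySem.List.mem_pyRange_one.mp hi).1; omega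
        simp [show i ≠ 0 by omega])]
    rw [PySem.List.foldl_append_singleton_eq_map]
    rw [map_pair_eq_zip (a::b::t) (0+1) (by norm_num)]
    have hb : PySem.List.pyGetD (a::b::t) 1 0 = b := by
      rw [PySem.List.pyGetD_eq_getElem _ 0 (by norm_num) (by simp)]; rfl
    simp [PySem.List.pyGetD_zero_cons, hb, List.dropLast_cons_of_ne_nil]

-- ===== VERDICT (by name: the statement is the Claim_ definition above) =====
theorem generate_segment_list_spec : Claim_equal_generate_segment_list := by
  intro seg _
  exact ports_agree seg
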